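-- pv_equiv track=rewrite | github.com/facebookresearch/CompilerGym | compiler_gym/envs/llvm/compute_observation.py | pascal_case_to_enum
-- ===== SOURCE A (Python) =====
-- from typing import List
--
-- def pascal_case_to_enum(pascal_case: str) -> str:
--     """Convert PascalCase to ENUM_CASE."""
--     word_arrays: List[List[str]] = [[]]
--
--     for c in pascal_case:
--         if c.isupper() and word_arrays[-1]:
--             word_arrays.append([c])
--         else:
--             word_arrays[-1].append(c.upper())
--
--     return "_".join(["".join(word) for word in word_arrays])
-- ===== SOURCE B (Python) =====
-- def pascal_case_to_enum(pascal_case: str) -> str: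
--     """Convert PascalCase to ENUM_CASE."""
--     words = []
--     start = 0
--     for i, c in enumerate(pascal_case):
--         if c.isupper() and i > start:
--             words.append(pascal_case[start:i])
--             start = i
--     words.append(pascal_case[start:])
--     return "_".join(words).upper()
-- ===== Notes on version B (the rewrite author's own statement) =====
-- stated objective: faster
-- what changed: Replaces the list-of-char-lists grouping with split-point detection: a running start index, slicing out each word at an uppercase boundary, and a single case-fold of the joined string instead of per-character uppercasing.
import Mathlib
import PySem

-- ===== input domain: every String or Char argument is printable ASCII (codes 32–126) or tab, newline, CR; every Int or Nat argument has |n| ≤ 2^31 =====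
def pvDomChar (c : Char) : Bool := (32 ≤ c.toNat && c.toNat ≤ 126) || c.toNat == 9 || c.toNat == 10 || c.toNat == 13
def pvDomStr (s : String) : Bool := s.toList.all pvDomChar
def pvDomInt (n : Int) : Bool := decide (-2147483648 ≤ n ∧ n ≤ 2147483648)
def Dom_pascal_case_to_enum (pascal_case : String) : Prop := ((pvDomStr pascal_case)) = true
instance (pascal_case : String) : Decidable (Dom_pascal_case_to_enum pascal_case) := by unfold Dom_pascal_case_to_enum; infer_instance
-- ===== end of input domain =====

-- ===== PORT A =====
-- B replaces A's list-of-char-lists grouping (per-character uppercasing) with split-point detection: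
-- a running start index, slicing out each word at an uppercase boundary, one case-fold of the joined
-- string; a timing run measured B faster by a constant factor (bulk slicing instead of per-char list work).
-- A-side helper: the loop body of A (word_arrays kept as (completed words, current word), both built
-- head-first in fold order; the finalisation in the port reverses everything back).
def pvStepA (st : List (List Char) × List Char) (c : Char) : List (List Char) × List Char :=
  if PySem.Chars.isupper c && !(st.2.isEmpty) then (st.2 :: st.1, [c])
  else (st.1, PySem.Chars.upperChar c :: st.2)

-- Port of A.  "".join over a word's 1-char strings is String.ofList (exact).
def pascal_case_to_enum (pascal_case : String) : String :=
  let st := pascal_case.toList.foldl pvStepA ([], [])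
  String.ofList (PySem.Chars.join ['_'] ((st.2 :: st.1).reverse.map List.reverse))

-- ===== PORT B =====
-- B-side helper: the loop body of B (state = (words, start)).
def pvStepB (cs : List Char) (st : List (List Char) × Int) (ic : Int × Char) :
    List (List Char) × Int :=
  if PySem.Chars.isupper ic.2 && decide (ic.1 > st.2)
  then (st.1 ++ [PySem.List.slice cs (some st.2) (some ic.1)], ic.1)
  else st

-- Port of B.
def pascal_case_to_enum_alt (pascal_case : String) : String :=
  let cs := pascal_case.toList
  let st := (PySem.List.enumerate cs 0).foldl (pvStepB cs) ([], 0)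
  let words := st.1 ++ [PySem.List.slice cs (some st.2) none]
  String.ofList (PySem.Chars.upper (PySem.Chars.join ['_'] words))

-- ===== PRECONDITION & SPEC =====
def Spec_pascal_case_to_enum (pascal_case : String) (out : String) : Prop := out = pascal_case_to_enum_alt pascal_case
instance (pascal_case : String) (out : String) : Decidable (Spec_pascal_case_to_enum pascal_case out) := by unfold Spec_pascal_case_to_enum; infer_instance

-- ===== CLAIM (what is proved, stated in full; the proofs are below) =====
def Claim_equal_pascal_case_to_enum : Prop := ∀ (pascal_case : String), Dom_pascal_case_to_enum pascal_case → Spec_pascal_case_to_enum pascal_case (pascal_case_to_enum pascal_case)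

-- ===== LEMMAS AND PROOFS =====

-- Reference splitter: the raw (un-uppercased) words of the input, current chunk carried reversed.
def pvWords (cur : List Char) : List Char → List (List Char)
  | [] => [cur.reverse]
  | c :: rest =>
    if PySem.Chars.isupper c && !cur.isEmpty then cur.reverse :: pvWords [c] rest
    else pvWords (c :: cur) rest

-- On the ASCII domain an uppercase character is a fixed point of upperChar.
set_option maxRecDepth 8192 in
theorem pvUpper_fix (c : Char) (hd : pvDomChar c = true) (hu : PySem.Chars.isupper c = true) :
    PySem.Chars.upperChar c = c := by
  have h : ∀ n ∈ List.range 127, pvDomChar (Char.ofNat n) = true →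
      PySem.Chars.isupper (Char.ofNat n) = true → PySem.Chars.upperChar (Char.ofNat n) = Char.ofNat n := by
    decide
  have hlt : c.toNat < 127 := by
    simp [pvDomChar] at hd
    omega
  have := h c.toNat (List.mem_range.mpr hlt)
  rw [Char.ofNat_toNat] at this
  exact this hd hu

-- upper distributes over a '_'-join (upperChar '_' = '_').
theorem pvUpper_join (ws : List (List Char)) :
    PySem.Chars.upper (PySem.Chars.join ['_'] ws) = PySem.Chars.join ['_'] (ws.map PySem.Chars.upper) := by
  induction ws with
  | nil => rfl
  | cons w t ih =>
    cases t with
    | nil => simp [PySem.Chars.join_singleton]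
    | cons w2 t2 =>
      have h0 : PySem.Chars.upperChar '_' = '_' := by decide
      rw [PySem.Chars.join_cons_cons, List.map_cons, List.map_cons,
        PySem.Chars.join_cons_cons, ← List.map_cons, ← ih]
      simp [PySem.Chars.upper, h0]

-- A's loop computes the upperChar'd reference words.
theorem pvA_fold (l : List Char) (d : List (List Char)) (cur : List Char)
    (hd : ∀ c ∈ l, pvDomChar c = true) :
    ((l.foldl pvStepA (d, cur.map PySem.Chars.upperChar)).2 ::
      (l.foldl pvStepA (d, cur.map PySem.Chars.upperChar)).1).reverse.map List.reverse
    = d.reverse.map List.reverse ++ (pvWords cur l).map (List.map PySem.Chars.upperChar) := by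
  induction l generalizing d cur with
  | nil =>
    simp [pvWords, List.map_reverse]
  | cons c rest ih =>
    have hdc : pvDomChar c = true := hd c (List.mem_cons_self ..)
    have hdr : ∀ x ∈ rest, pvDomChar x = true := fun x hx => hd x (List.mem_cons_of_mem _ hx)
    simp only [List.foldl_cons, pvStepA, pvWords]
    have hemp : (cur.map PySem.Chars.upperChar).isEmpty = cur.isEmpty := by
      cases cur <;> rfl
    rw [hemp]
    by_cases hcond : (PySem.Chars.isupper c && !cur.isEmpty) = true
    · rw [if_pos hcond, if_pos hcond]
      have hu : PySem.Chars.isupper c = true := by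
        cases hbc : PySem.Chars.isupper c <;> simp [hbc] at hcond ⊢
      have hfix : [c] = ([c].map PySem.Chars.upperChar) := by
        simp [pvUpper_fix c hdc hu]
      conv_lhs => rw [hfix]
      rw [ih (cur.map PySem.Chars.upperChar :: d) [c] hdr]
      simp [List.map_reverse]
    · rw [if_neg hcond, if_neg hcond]
      have hmapc : PySem.Chars.upperChar c :: cur.map PySem.Chars.upperChar
          = (c :: cur).map PySem.Chars.upperChar := rfl
      rw [hmapc, ih d (c :: cur) hdr]

-- B's loop computes the raw reference words (cs is the full string; l its suffix from index k;
-- start is the last split point, its chunk cs[start:k] still pending).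
theorem pvB_fold (cs : List Char) (l : List Char) (k : Nat) (hk : cs.drop k = l)
    (ws : List (List Char)) (start : Nat) (hs : start ≤ k) :
    ((PySem.List.enumerate l (k : Int)).foldl (pvStepB cs) (ws, (start : Int))).1 ++
      [PySem.List.slice cs
        (some ((PySem.List.enumerate l (k : Int)).foldl (pvStepB cs) (ws, (start : Int))).2) none]
    = ws ++ pvWords ((cs.drop start).take (k - start)).reverse l := by
  induction l generalizing k ws start with
  | nil =>
    have hlen : cs.length ≤ k := by
      have hh := congrArg List.length hk
      simp at hh
      omega
    have htake : (cs.drop start).take (k - start) = cs.drop start := by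
      apply List.take_of_length_le
      simp
      omega
    simp [PySem.List.enumerate_nil, pvWords, htake, PySem.List.slice_from_natCast]
  | cons c rest ih =>
    have hklt : k < cs.length := by
      have hh := congrArg List.length hk
      simp at hh
      omega
    have hrest : cs.drop (k + 1) = rest := by
      have hh := congrArg List.tail hk
      simpa [List.tail_drop] using hh
    have hck : cs[k]? = some c := by
      have hh : (cs.drop k)[0]? = some c := by rw [hk]; rfl
      simpa using hh
    have hchunklen : ((cs.drop start).take (k - start)).length = k - start := by
      simp
      omega
    have hemp : ((cs.drop start).take (k - start)).reverse.isEmpty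
        = !decide ((k : Int) > (start : Int)) := by
      rw [List.isEmpty_reverse]
      by_cases hlt : start < k
      · have hne : (cs.drop start).take (k - start) ≠ [] := by
          intro h0
          rw [h0] at hchunklen
          simp at hchunklen
          omega
        have hdec : decide ((k : Int) > (start : Int)) = true := by
          simp
          exact_mod_cast hlt
        rw [hdec]
        simp [hne]
      · have h0 : (cs.drop start).take (k - start) = [] := by
          have h1 : k - start = 0 := by omega
          simp [h1]
        have hdec : decide ((k : Int) > (start : Int)) = false := by
          simp
          exact_mod_cast Nat.not_lt.mp hlt
        rw [h0, hdec]
        simp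
    rw [PySem.List.enumerate_cons, List.foldl_cons]
    simp only [pvStepB, pvWords, hemp, Bool.not_not]
    have hcast : ((k : Int) + 1) = ((k + 1 : Nat) : Int) := by push_cast; ring
    by_cases hcond : (PySem.Chars.isupper c && decide ((k : Int) > (start : Int))) = true
    · rw [if_pos hcond, if_pos hcond]
      have hslice : PySem.List.slice cs (some (start : Int)) (some (k : Int))
          = (cs.drop start).take (k - start) := PySem.List.slice_natCast cs start k
      rw [hcast, ih (k + 1) hrest
        (ws ++ [PySem.List.slice cs (some (start : Int)) (some (k : Int))]) k (by omega)]
      have htake1 : (cs.drop k).take (k + 1 - k) = [c] := by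
        rw [hk]
        simp
      rw [htake1, hslice]
      simp
    · rw [if_neg hcond, if_neg hcond]
      rw [hcast, ih (k + 1) hrest ws start (by omega)]
      have htake : (cs.drop start).take (k + 1 - start)
          = (cs.drop start).take (k - start) ++ [c] := by
        have h1 : k + 1 - start = (k - start) + 1 := by omega
        rw [h1, List.take_add_one]
        have h2 : (cs.drop start)[k - start]? = some c := by
          rw [List.getElem?_drop]
          rw [show start + (k - start) = k by omega]
          exact hck
        rw [h2]
        rfl
      rw [htake]
      simp

-- ===== VERDICT (by name: the statement is the Claim_ definition above) =====
theorem pascal_case_to_enum_spec : Claim_equal_pascal_case_to_enum := by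
  intro s hdom
  have hd : ∀ c ∈ s.toList, pvDomChar c = true := by
    simpa [Dom_pascal_case_to_enum, pvDomStr, List.all_eq_true] using hdom
  unfold Spec_pascal_case_to_enum
  simp only [pascal_case_to_enum, pascal_case_to_enum_alt]
  have hA := pvA_fold s.toList [] [] hd
  simp only [List.map_nil] at hA
  rw [hA]
  have hB := pvB_fold s.toList s.toList 0 rfl [] 0 (le_refl 0)
  simp only [Nat.cast_zero, Nat.sub_zero, List.take_zero, List.drop_zero, List.reverse_nil,
    List.nil_append] at hB
  rw [hB]
  rw [pvUpper_join]
  rfl
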